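-- pv_equiv track=rewrite | github.com/SayahOsama/matrix_server | app.py | compress_frames
-- ===== SOURCE A (Python) =====
-- def compress_frames(frames):
--     length = len(frames)
--     compressed_frames = []
--     for i in range(length - 1, 0, -1):
--         frame = delete_indetical_colors(frames[i - 1], frames[i])
--         compressed_frames.append(frame)
--     compressed_frames.append(frames[0])
--     compressed_frames.reverse()
--     return compressed_frames
--
-- def delete_indetical_colors(prev_frame, frame):
--     for i in range(len(frame)):
--         if (frame[i] == prev_frame[i]):
--             frame[i] = -1
--     return frame
-- ===== SOURCE B (Python) =====
-- def compress_frames(frames):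
--     # Column-major two-stage algorithm: compress each pixel column across the
--     # frame sequence, then reassemble rows from the columns.
--     width = len(frames[0])
--     cols = []
--     for j in range(width):
--         col = []
--         prev = None
--         for f in frames:
--             if j >= len(f):
--                 break
--             v = f[j]
--             col.append(-1 if prev == v else v)
--             prev = v
--         cols.append(col)
--     return [[cols[j][i] for j in range(len(frames[i]))] for i in range(len(frames))]
-- ===== Notes on version B (the rewrite author's own statement) =====
-- stated objective: alternative
-- what changed: Replaces A's row-major pass (each frame diffed in place against its predecessor, built backward then reversed) by a column-major two-stage algorithm: for each pixel position it first compresses the whole column of values across the frame sequence, then reassembles the rows from those columns; equivalence is about the return value only (A mutates frames[1:] in place, B does not). Pre_ excludes the empty list and sequences where a frame is longer than its predecessor, on which A raises IndexError.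
import Mathlib
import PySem

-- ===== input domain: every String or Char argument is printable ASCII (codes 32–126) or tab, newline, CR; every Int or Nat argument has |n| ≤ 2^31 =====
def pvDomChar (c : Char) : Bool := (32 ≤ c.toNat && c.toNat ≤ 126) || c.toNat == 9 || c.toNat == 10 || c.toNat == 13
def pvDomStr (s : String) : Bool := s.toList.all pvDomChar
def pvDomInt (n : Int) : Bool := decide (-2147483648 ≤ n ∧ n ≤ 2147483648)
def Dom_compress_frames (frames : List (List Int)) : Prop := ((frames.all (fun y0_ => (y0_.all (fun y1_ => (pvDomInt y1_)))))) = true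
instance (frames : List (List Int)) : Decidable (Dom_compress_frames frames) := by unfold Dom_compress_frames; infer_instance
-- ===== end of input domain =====

-- B replaces A's row-major in-place pass (diff each frame against its predecessor, built
-- backward then reversed) by a column-major two-stage algorithm: compress each pixel column
-- across the frame sequence, then reassemble rows from the columns (alternative; equivalence
-- is about the RETURN value only: Python A mutates frames[1:] in place, B does not).


-- ===== PORT A =====
def delete_indetical_colors (prev_frame frame : List Int) : List Int :=
  (PySem.List.pyRange 0 (frame.length : Int) 1).foldl
    (fun f i =>
      if PySem.List.pyGetD f i 0 = PySem.List.pyGetD prev_frame i 0 then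
        PySem.List.pySetD f i (-1)
      else f) frame

def compress_frames (frames : List (List Int)) : List (List Int) :=
  let length : Int := (frames.length : Int)
  let compressed : List (List Int) :=
    (PySem.List.pyRange (length - 1) 0 (-1)).foldl
      (fun acc i =>
        acc ++ [delete_indetical_colors (PySem.List.pyGetD frames (i - 1) [])
                  (PySem.List.pyGetD frames i [])]) []
  (compressed ++ [PySem.List.pyGetD frames 0 []]).reverse

-- ===== PORT B =====
-- one compressed pixel column: walk down the frames, stop at the first frame too short
-- (Python's `break`), carrying the previous value (None at the top of the column)
def pvColGo (j : Nat) (prev : Option Int) : List (List Int) → List Int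
  | [] => []
  | f :: fs =>
    if j < f.length then
      let v := f.getD j 0
      (if prev = some v then (-1 : Int) else v) :: pvColGo j (some v) fs
    else []

def compress_frames_alt (frames : List (List Int)) : List (List Int) :=
  let width := (frames.getD 0 []).length   -- Python's len(frames[0]); raises on [] (outside Pre_)
  let cols := (List.range width).map (fun j => pvColGo j none frames)
  (List.range frames.length).map (fun i =>
    (List.range (frames.getD i []).length).map (fun j => (cols.getD j []).getD i 0))

-- ===== PRECONDITION & SPEC =====
-- Pre_ excludes exactly the inputs on which A raises IndexError: the empty list
-- (frames[0]) and sequences where some frame is longer than its predecessor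
-- (prev_frame[i] out of range in delete_indetical_colors).
def Pre_compress_frames (frames : List (List Int)) : Prop :=
  frames ≠ [] ∧ ∀ p ∈ frames.zip frames.tail, (p.2 : List Int).length ≤ (p.1 : List Int).length
instance (frames : List (List Int)) : Decidable (Pre_compress_frames frames) := by
  unfold Pre_compress_frames; infer_instance

def pvWitness_compress_frames : List (List Int) := [[1, 2, 3], [1, 5, 3], [0, 5]]

def Spec_compress_frames (frames : List (List Int)) (out : List (List Int)) : Prop := out = compress_frames_alt frames
instance (frames : List (List Int)) (out : List (List Int)) : Decidable (Spec_compress_frames frames out) := by unfold Spec_compress_frames; infer_instance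

-- ===== CLAIM (what is proved, stated in full; the proofs are below) =====
def Claim_equal_compress_frames : Prop := ∀ (frames : List (List Int)), Dom_compress_frames frames → Pre_compress_frames frames → Spec_compress_frames frames (compress_frames frames)

-- ===== LEMMAS AND PROOFS =====

-- the canonical per-frame result both sides compute
def pvCanon (prev cur : List Int) : List Int :=
  cur.mapIdx (fun i c => if c = prev.getD i 0 then -1 else c)

def pvGo (prev : List Int) : List (List Int) → List (List Int)
  | [] => []
  | c :: cs => pvCanon prev c :: pvGo c cs

theorem pvSetLoop (prev : List Int) : ∀ (m k : Nat) (f : List Int), f.length ≤ k + m →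
    (List.range' k m).foldl (fun f j => if f.getD j 0 = prev.getD j 0 then f.set j (-1) else f) f
      = f.mapIdx (fun i c => if k ≤ i ∧ c = prev.getD i 0 then -1 else c) := by
  intro m
  induction m with
  | zero =>
    intro k f hf
    simp only [List.range', List.foldl_nil]
    apply List.ext_getElem
    · simp
    · intro i h1 h2
      simp only [List.getElem_mapIdx]
      have : ¬ (k ≤ i) := by omega
      simp [this]
  | succ m ih =>
    intro k f hf
    rw [List.range'_succ, List.foldl_cons]
    by_cases h : f.getD k 0 = prev.getD k 0
    · rw [if_pos h, ih (k + 1) (f.set k (-1)) (by simp only [List.length_set]; omega)]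
      apply List.ext_getElem
      · simp
      · intro i h1 h2
        have hi : i < f.length := by simpa using h2
        simp only [List.getElem_mapIdx]
        by_cases hik : k = i
        · subst hik
          have hfk : f[k]'hi = prev.getD k 0 := by rw [← List.getD_eq_getElem f 0 hi]; exact h
          rw [List.getElem_set_self]
          rw [if_neg (by rintro ⟨hc, _⟩; omega), if_pos ⟨le_refl k, hfk⟩]
        · rw [List.getElem_set_ne hik]
          exact if_congr (by constructor <;> (rintro ⟨ha, hb⟩; exact ⟨by omega, hb⟩)) rfl rfl
    · rw [if_neg h, ih (k + 1) f (by omega)]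
      apply List.ext_getElem
      · simp
      · intro i h1 h2
        have hi : i < f.length := by simpa using h2
        simp only [List.getElem_mapIdx]
        by_cases hik : k = i
        · subst hik
          have hfk : ¬ f[k]'hi = prev.getD k 0 := by rw [← List.getD_eq_getElem f 0 hi]; exact h
          rw [if_neg (by rintro ⟨hc, _⟩; omega), if_neg (by rintro ⟨_, hc⟩; exact hfk hc)]
        · exact if_congr (by constructor <;> (rintro ⟨ha, hb⟩; exact ⟨by omega, hb⟩)) rfl rfl

theorem pvDel_eq_canon (prev cur : List Int) : delete_indetical_colors prev cur = pvCanon prev cur := by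
  have h1 : delete_indetical_colors prev cur
      = (List.range cur.length).foldl
          (fun f k => if f.getD k 0 = prev.getD k 0 then f.set k (-1) else f) cur := by
    simp [delete_indetical_colors, PySem.List.pyRange_zero_nat, List.foldl_map]
  rw [h1, List.range_eq_range', pvSetLoop prev cur.length 0 cur (by omega)]
  simp [pvCanon]

theorem pvMap_range_go (rest : List (List Int)) : ∀ (prev : List Int),
    (List.range rest.length).map
        (fun k => delete_indetical_colors ((prev :: rest).getD k []) ((prev :: rest).getD (k + 1) []))
      = pvGo prev rest := by
  induction rest with
  | nil => intro prev; simp [pvGo]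
  | cons c cs ih =>
    intro prev
    rw [List.length_cons, List.range_succ_eq_map, List.map_cons, List.map_map, pvGo]
    congr 1
    · have h0 : delete_indetical_colors ((prev :: c :: cs).getD 0 []) ((prev :: c :: cs).getD (0 + 1) [])
          = delete_indetical_colors prev c := by norm_num
      rw [h0, pvDel_eq_canon]
    · rw [← ih c]
      apply List.map_congr_left
      intro k _
      simp [Function.comp]

-- A's result, characterised: f0 followed by the per-row canonical diffs
theorem pvA_char (f0 : List Int) (rest : List (List Int)) :
    compress_frames (f0 :: rest) = f0 :: pvGo f0 rest := by
  simp only [compress_frames]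
  rw [PySem.List.foldl_append_singleton_eq_map, List.nil_append,
    PySem.List.pyRange_neg_one_eq_reverse]
  rw [show ((0 : Int) + 1) = 1 from by norm_num]
  rw [show ((f0 :: rest).length : Int) - 1 + 1 = ((f0 :: rest).length : Int) from by ring]
  rw [List.map_reverse, List.reverse_append, List.reverse_reverse, List.reverse_singleton,
    List.singleton_append, PySem.List.pyGetD_zero_cons, PySem.List.pyRange_one, List.map_map]
  rw [show (((f0 :: rest).length : Int) - 1).toNat = rest.length from by simp]
  rw [← pvMap_range_go rest f0]
  congr 1
  apply List.map_congr_left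
  intro k hk
  simp only [Function.comp]
  rw [show (1 : Int) + (k : Int) - 1 = ((k : Nat) : Int) from by ring]
  rw [show (1 : Int) + (k : Int) = (((k + 1 : Nat)) : Int) from by push_cast; ring]
  rw [PySem.List.pyGetD_natCast, PySem.List.pyGetD_natCast]

-- chain of adjacent length bounds, in getD form
theorem pvAdj_getD : ∀ (frames : List (List Int)),
    (∀ p ∈ frames.zip frames.tail, (p.2 : List Int).length ≤ (p.1 : List Int).length) →
    ∀ k, (frames.getD (k + 1) []).length ≤ (frames.getD k []).length := by
  intro frames
  induction frames with
  | nil => intro _ k; simp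
  | cons f fs ih =>
    intro h k
    cases k with
    | zero =>
      cases fs with
      | nil => simp
      | cons g gs => exact h (f, g) (by simp)
    | succ k =>
      have h' : ∀ p ∈ fs.zip fs.tail, (p.2 : List Int).length ≤ (p.1 : List Int).length := by
        intro p hp
        apply h p
        cases fs with
        | nil => simp at hp
        | cons g gs => simp [List.zip_cons_cons] at hp ⊢; right; exact hp
      simpa using ih h' k

theorem pvLen_le_head (frames : List (List Int))
    (h : ∀ k, (frames.getD (k + 1) []).length ≤ (frames.getD k []).length) :
    ∀ i, (frames.getD i []).length ≤ (frames.getD 0 []).length := by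
  intro i
  induction i with
  | zero => exact le_refl _
  | succ i ih => exact le_trans (h i) ih

-- the previous value seen by row i of a column (None at the top)
def pvPrevOf (frames : List (List Int)) (j : Nat) (prev : Option Int) : Nat → Option Int
  | 0 => prev
  | k + 1 => some ((frames.getD k []).getD j 0)

-- the i-th entry of a compressed column
theorem pvCol_getD : ∀ (frames : List (List Int)) (i j : Nat) (prev : Option Int),
    (∀ k, (frames.getD (k + 1) []).length ≤ (frames.getD k []).length) →
    j < (frames.getD i []).length →
    (pvColGo j prev frames).getD i 0 =
      (if pvPrevOf frames j prev i = some ((frames.getD i []).getD j 0)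
       then -1 else (frames.getD i []).getD j 0) := by
  intro frames
  induction frames with
  | nil => intro i j prev _ hj; simp at hj
  | cons f fs ih =>
    intro i j prev hadj hj
    have hadj' : ∀ k, (fs.getD (k + 1) []).length ≤ (fs.getD k []).length := by
      intro k; simpa using hadj (k + 1)
    cases i with
    | zero =>
      simp only [List.getD_cons_zero] at hj ⊢
      rw [pvColGo, if_pos hj]
      simp [pvPrevOf]
    | succ i =>
      simp only [List.getD_cons_succ] at hj ⊢
      have hjf : j < f.length := by
        have h1 : (fs.getD i []).length ≤ ((f :: fs).getD 0 []).length :=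
          pvLen_le_head (f :: fs) hadj (i + 1)
        simp only [List.getD_cons_zero] at h1
        omega
      rw [pvColGo, if_pos hjf]
      simp only [List.getD_cons_succ]
      rw [ih i j (some (f.getD j 0)) hadj' hj]
      cases i with
      | zero => simp [pvPrevOf]
      | succ k => simp [pvPrevOf]

-- row i of B's output is the canonical diff of frames[i] against frames[i-1]
theorem pvGo_getD : ∀ (rest : List (List Int)) (prev : List Int) (i : Nat), i < rest.length →
    (pvGo prev rest).getD i [] = pvCanon ((prev :: rest).getD i []) (rest.getD i []) := by
  intro rest
  induction rest with
  | nil => intro prev i hi; simp at hi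
  | cons c cs ih =>
    intro prev i hi
    cases i with
    | zero => simp [pvGo]
    | succ i =>
      simp only [pvGo, List.getD_cons_succ]
      exact ih c i (by simpa using hi)

theorem pvGo_length : ∀ (rest : List (List Int)) (prev : List Int),
    (pvGo prev rest).length = rest.length := by
  intro rest
  induction rest with
  | nil => intro prev; simp [pvGo]
  | cons c cs ih => intro prev; simp [pvGo, ih]

theorem pvCanon_length (prev cur : List Int) : (pvCanon prev cur).length = cur.length := by
  simp [pvCanon]

-- a list rebuilt from its getD entries
theorem pvRange_getD (l : List Int) : (List.range l.length).map (fun j => l.getD j 0) = l := by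
  apply List.ext_getElem
  · simp
  · intro i h1 h2
    simp only [List.getElem_map, List.getElem_range]
    exact List.getD_eq_getElem l 0 h2

-- one entry of B's row i, via the column characterisation
theorem pvB_row_entry (f0 : List Int) (rest : List (List Int)) (i j : Nat)
    (hadj : ∀ k, ((f0 :: rest).getD (k + 1) []).length ≤ ((f0 :: rest).getD k []).length)
    (hj : j < ((f0 :: rest).getD i []).length) :
    (((List.range f0.length).map (fun j => pvColGo j none (f0 :: rest))).getD j []).getD i 0 =
      (if pvPrevOf (f0 :: rest) j none i = some (((f0 :: rest).getD i []).getD j 0)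
       then -1 else ((f0 :: rest).getD i []).getD j 0) := by
  have hjw : j < f0.length := by
    have := pvLen_le_head (f0 :: rest) hadj i
    simp only [List.getD_cons_zero] at this
    omega
  have hcols : ((List.range f0.length).map (fun j => pvColGo j none (f0 :: rest))).getD j []
      = pvColGo j none (f0 :: rest) := by
    rw [List.getD_eq_getElem _ [] (by simpa using hjw), List.getElem_map, List.getElem_range]
  rw [hcols, pvCol_getD (f0 :: rest) i j none hadj hj]

-- B's result, characterised the same way
theorem pvB_char (f0 : List Int) (rest : List (List Int))
    (hch : ∀ p ∈ (f0 :: rest).zip rest, (p.2 : List Int).length ≤ (p.1 : List Int).length) :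
    compress_frames_alt (f0 :: rest) = f0 :: pvGo f0 rest := by
  have hadj : ∀ k, ((f0 :: rest).getD (k + 1) []).length ≤ ((f0 :: rest).getD k []).length :=
    pvAdj_getD (f0 :: rest) (by simpa using hch)
  simp only [compress_frames_alt, List.getD_cons_zero]
  apply List.ext_getElem
  · simp [pvGo_length]
  · intro i h1 h2
    have hi : i < (f0 :: rest).length := by simpa using h1
    rw [List.getElem_map, List.getElem_range]
    cases i with
    | zero =>
      simp only [List.getD_cons_zero, List.getElem_cons_zero]
      conv_rhs => rw [← pvRange_getD f0]
      apply List.map_congr_left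
      intro j hj
      rw [pvB_row_entry f0 rest 0 j hadj (by simpa using hj)]
      simp [pvPrevOf]
    | succ i =>
      have hilen : i < rest.length := by simpa using hi
      rw [List.getElem_cons_succ]
      have hR : (pvGo f0 rest)[i]'(by simpa [pvGo_length] using hilen)
          = pvCanon ((f0 :: rest).getD i []) (rest.getD i []) := by
        rw [← List.getD_eq_getElem (pvGo f0 rest) [] (by simpa [pvGo_length] using hilen)]
        exact pvGo_getD rest f0 i hilen
      rw [hR]
      apply List.ext_getElem
      · simp [pvCanon_length]
      · intro j hj1 hj2
        have hjlen : j < ((f0 :: rest).getD (i + 1) []).length := by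
          simp only [List.getD_cons_succ]
          simpa [pvCanon_length] using hj2
        rw [List.getElem_map, List.getElem_range]
        rw [pvB_row_entry f0 rest (i + 1) j hadj hjlen]
        have hjc : j < (rest.getD i []).length := by simpa [pvCanon_length] using hj2
        have hcur : ((f0 :: rest).getD (i + 1) []).getD j 0
            = (rest.getD i [])[j]'hjc := by
          rw [List.getD_cons_succ, List.getD_eq_getElem _ 0 hjc]
        simp only [pvPrevOf, pvCanon, List.getElem_mapIdx, hcur, Option.some.injEq]
        exact if_congr eq_comm rfl rfl

-- ===== VERDICT (by name: the statement is the Claim_ definition above) =====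
theorem compress_frames_spec : Claim_equal_compress_frames := by
  intro frames _ hpre
  obtain ⟨hne, hch⟩ := hpre
  obtain ⟨f0, rest, rfl⟩ : ∃ f0 rest, frames = f0 :: rest := by
    cases frames with
    | nil => exact absurd rfl hne
    | cons a l => exact ⟨a, l, rfl⟩
  unfold Spec_compress_frames
  rw [pvA_char, pvB_char f0 rest (by simpa using hch)]
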